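-- pv_equiv track=rewrite | github.com/illtown/true_color_test | true_color_test.py | gen_clr_seq
-- ===== SOURCE A (Python) =====
-- def gen_clr_seq(clr_lst):
--     ''' gen all possible color seq '''
--     if len(clr_lst) == 0:
--         return ['']
--
--     rest_clr_lst = gen_clr_seq(clr_lst[1:])
--
--     tmp_set = set()
--     for item in rest_clr_lst:
--         for ndx in range(len(item) + 1):
--             tmp_lst = list(item)
--             tmp_lst.insert(ndx, clr_lst[0])
--             tmp_set.add(''.join(tmp_lst))
--     return sorted(tmp_set)
-- ===== SOURCE B (Python) =====
-- def gen_clr_seq(clr_lst):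
--     ''' gen all possible color seq '''
--     acc = ['']
--     for clr in reversed(clr_lst):
--         acc = list(dict.fromkeys(s[:i] + clr + s[i:]
--                                  for s in acc for i in range(len(s) + 1)))
--     return sorted(acc)
-- ===== Notes on version B (the rewrite author's own statement) =====
-- stated objective: simpler
-- what changed: Replaces A's recursion (insert head into every char position of each tail-result, with a set and a sort at every level) by a single iterative fold over reversed(clr_lst) that rebuilds the strings with slice concatenation, dedups via dict.fromkeys in generation order, and sorts once at the end.
import Mathlib
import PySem

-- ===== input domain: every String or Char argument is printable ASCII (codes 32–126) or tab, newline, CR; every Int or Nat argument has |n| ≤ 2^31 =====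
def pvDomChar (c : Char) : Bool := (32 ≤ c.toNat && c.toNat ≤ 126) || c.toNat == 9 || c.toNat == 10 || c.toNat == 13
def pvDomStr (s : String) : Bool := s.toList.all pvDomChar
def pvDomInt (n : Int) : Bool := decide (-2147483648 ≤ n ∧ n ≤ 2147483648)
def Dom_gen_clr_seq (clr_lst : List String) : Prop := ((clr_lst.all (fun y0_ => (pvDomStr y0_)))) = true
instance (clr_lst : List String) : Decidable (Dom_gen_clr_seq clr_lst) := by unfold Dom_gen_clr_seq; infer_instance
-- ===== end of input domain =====

-- B replaces A's recursion (insert head into each permutation of the tail, set + sort at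
-- every level) by a single iterative fold over reversed(clr_lst) that rebuilds the string
-- set with slice concatenation, dedups in generation order and sorts once at the end
-- (objective: simpler; same values on every input).

-- ===== PORT A =====
-- ''.join(tmp_lst) where tmp_lst = list(item) with clr inserted at position ndx
def pvJoinInsA (clr item : String) (ndx : Int) : String :=
  -- tmp_lst = list(item); tmp_lst.insert(ndx, clr); ''.join(tmp_lst)
  PySem.Str.join ""
    (PySem.List.insert (item.toList.map (fun ch => String.ofList [ch])) ndx clr)

def gen_clr_seq (clr_lst : List String) : List String :=
  match clr_lst with
  | [] => [""]                                                   -- if len(clr_lst) == 0: return ['']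
  | clr0 :: rest =>                                              -- clr_lst[0] is clr0, clr_lst[1:] is rest
    let rest_clr_lst := gen_clr_seq rest
    let tmp_set : PySem.Set String :=
      rest_clr_lst.foldl (fun tmp_set item =>
        (PySem.List.pyRange 0 (PySem.Str.len item + 1) 1).foldl  -- for ndx in range(len(item) + 1)
          (fun tmp_set ndx => PySem.Set.add tmp_set (pvJoinInsA clr0 item ndx))
          tmp_set)
        PySem.Set.empty
    PySem.List.sorted tmp_set (fun x => x) false                 -- sorted(tmp_set)

-- ===== PORT B =====
-- s[:i] + clr + s[i:]
def pvInsB (clr s : String) (i : Int) : String :=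
  String.ofList (PySem.List.slice s.toList none (some i) ++ clr.toList ++
                 PySem.List.slice s.toList (some i) none)

-- acc = list(dict.fromkeys(s[:i] + clr + s[i:] for s in acc for i in range(len(s) + 1)))
def pvStepB (acc : List String) (clr : String) : List String :=
  PySem.List.dedup (acc.flatMap (fun s =>
    (PySem.List.pyRange 0 (PySem.Str.len s + 1) 1).map (fun i => pvInsB clr s i)))

def gen_clr_seq_alt (clr_lst : List String) : List String :=
  let acc := clr_lst.reverse.foldl pvStepB [""]                  -- for clr in reversed(clr_lst)
  PySem.List.sorted acc (fun x => x) false                       -- sorted(acc)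

-- ===== PRECONDITION & SPEC =====
def Spec_gen_clr_seq (clr_lst : List String) (out : List String) : Prop := out = gen_clr_seq_alt clr_lst
instance (clr_lst : List String) (out : List String) : Decidable (Spec_gen_clr_seq clr_lst out) := by unfold Spec_gen_clr_seq; infer_instance

-- ===== CLAIM (what is proved, stated in full; the proofs are below) =====
def Claim_equal_gen_clr_seq : Prop := ∀ (clr_lst : List String), Dom_gen_clr_seq clr_lst → Spec_gen_clr_seq clr_lst (gen_clr_seq clr_lst)

-- ===== LEMMAS AND PROOFS =====

-- `''.join` over a list of chars-as-strings is just concatenation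
theorem pvFlatten_singletons {α : Type} (l : List α) : (List.map (fun x => [x]) l).flatten = l := by
  induction l with
  | nil => rfl
  | cons h t ih => simp [ih]

theorem pvIntercalate_nil (css : List (List Char)) : List.intercalate [] css = css.flatten := by
  induction css with
  | nil => simp [List.intercalate]
  | cons h t ih =>
    cases t with
    | nil => simp [List.intercalate]
    | cons h2 t2 =>
      simp [List.intercalate] at ih ⊢
      simpa using ih

-- A's join-of-inserted-char-list equals B's slice concatenation, for every ndx in the range
theorem pvJoinInsA_eq_pvInsB (clr item : String) (k : Nat) (hk : k ≤ item.toList.length) :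
    pvJoinInsA clr item (k : Int) = pvInsB clr item (k : Int) := by
  apply String.toList_injective
  unfold pvJoinInsA pvInsB
  rw [PySem.List.insert_natCast _ k _ (by simpa using hk)]
  rw [PySem.List.slice_to_natCast, PySem.List.slice_from_natCast]
  rw [PySem.Str.toList_join]
  simp only [PySem.Chars.join]
  have h0 : "".toList = ([] : List Char) := rfl
  rw [h0, pvIntercalate_nil]
  simp [← List.map_take, ← List.map_drop, Function.comp_def, pvFlatten_singletons]

-- the list of all insertions of clr into s (the same list in both ports)
def pvInsList (clr s : String) : List String :=
  (PySem.List.pyRange 0 (PySem.Str.len s + 1) 1).map (fun i => pvInsB clr s i)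

-- A's inner for-loop over range(len(item)+1) is Set.update with pvInsList
theorem pvInnerA_eq_update (clr item : String) (s0 : PySem.Set String) :
    (PySem.List.pyRange 0 (PySem.Str.len item + 1) 1).foldl
      (fun tmp_set ndx => PySem.Set.add tmp_set (pvJoinInsA clr item ndx)) s0
    = PySem.Set.update s0 (pvInsList clr item) := by
  have hmap : (PySem.List.pyRange 0 (PySem.Str.len item + 1) 1).map (fun i => pvJoinInsA clr item i)
      = pvInsList clr item := by
    unfold pvInsList
    apply List.map_congr_left
    intro i hi
    rw [PySem.List.mem_pyRange_one] at hi
    obtain ⟨k, rfl⟩ := Int.eq_ofNat_of_zero_le hi.1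
    have hk : k ≤ item.toList.length := by
      have := hi.2; rw [PySem.Str.len_eq] at this; omega
    exact pvJoinInsA_eq_pvInsB clr item k hk
  calc (PySem.List.pyRange 0 (PySem.Str.len item + 1) 1).foldl
        (fun tmp_set ndx => PySem.Set.add tmp_set (pvJoinInsA clr item ndx)) s0
      = ((PySem.List.pyRange 0 (PySem.Str.len item + 1) 1).map
          (fun i => pvJoinInsA clr item i)).foldl PySem.Set.add s0 := by
        rw [List.foldl_map]
    _ = PySem.Set.update s0 (pvInsList clr item) := by rw [hmap]; rfl

-- membership in A's accumulated set
theorem pvMem_foldl_update (clr : String) (prev : List String) (s0 : PySem.Set String) (x : String) :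
    x ∈ prev.foldl (fun s item => PySem.Set.update s (pvInsList clr item)) s0
    ↔ x ∈ s0 ∨ ∃ it ∈ prev, x ∈ pvInsList clr it := by
  induction prev generalizing s0 with
  | nil => simp
  | cons h t ih =>
    simp only [List.foldl_cons, ih, PySem.Set.mem_update]
    constructor
    · rintro (⟨hx | hx⟩ | ⟨it, hit, hx⟩)
      · exact Or.inl hx
      · exact Or.inr ⟨h, by simp, hx⟩
      · exact Or.inr ⟨it, by simp [hit], hx⟩
    · rintro (hx | ⟨it, hit, hx⟩)
      · exact Or.inl (Or.inl hx)
      · rcases List.mem_cons.mp hit with rfl | hit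
        · exact Or.inl (Or.inr hx)
        · exact Or.inr ⟨it, hit, hx⟩

-- A's accumulated set is duplicate-free
theorem pvNodup_foldl_update (clr : String) (prev : List String) (s0 : PySem.Set String)
    (h0 : s0.Nodup) :
    (prev.foldl (fun s item => PySem.Set.update s (pvInsList clr item)) s0).Nodup := by
  induction prev generalizing s0 with
  | nil => exact h0
  | cons h t ih => exact ih _ (PySem.Set.nodup_update _ _ h0)

-- B's accumulator, named for the induction
def pvAccB (clr_lst : List String) : List String := clr_lst.reverse.foldl pvStepB [""]

theorem pvAccB_cons (c : String) (rest : List String) :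
    pvAccB (c :: rest) = pvStepB (pvAccB rest) c := by
  unfold pvAccB
  rw [List.reverse_cons, List.foldl_append, List.foldl_cons, List.foldl_nil]

theorem pvMem_stepB (acc : List String) (clr x : String) :
    x ∈ pvStepB acc clr ↔ ∃ s ∈ acc, x ∈ pvInsList clr s := by
  unfold pvStepB pvInsList
  rw [PySem.List.mem_dedup, List.mem_flatMap]

-- A's tmp_set (rewritten) in closed form, used to unfold the port
theorem pvGenA_cons (clr0 : String) (rest : List String) :
    gen_clr_seq (clr0 :: rest)
    = PySem.List.sorted
        ((gen_clr_seq rest).foldl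
          (fun s item => PySem.Set.update s (pvInsList clr0 item)) PySem.Set.empty)
        (fun x => x) false := by
  show PySem.List.sorted
        ((gen_clr_seq rest).foldl (fun tmp_set item =>
          (PySem.List.pyRange 0 (PySem.Str.len item + 1) 1).foldl
            (fun tmp_set ndx => PySem.Set.add tmp_set (pvJoinInsA clr0 item ndx)) tmp_set)
          PySem.Set.empty) (fun x => x) false = _
  congr 1
  apply PySem.List.foldl_congr_mem
  intro s item _
  exact pvInnerA_eq_update clr0 item s

-- the heart: A's result is a permutation of B's accumulator, at every level
theorem pvPerm_main (clr_lst : List String) : (gen_clr_seq clr_lst).Perm (pvAccB clr_lst) := by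
  induction clr_lst with
  | nil => simp [gen_clr_seq, pvAccB]
  | cons clr0 rest ih =>
    rw [pvGenA_cons, pvAccB_cons]
    have hnodupA : ((gen_clr_seq rest).foldl
        (fun s item => PySem.Set.update s (pvInsList clr0 item)) PySem.Set.empty).Nodup :=
      pvNodup_foldl_update clr0 _ _ (by simp [PySem.Set.empty])
    have hnodupL := (PySem.List.sorted_perm _ (fun x : String => x) false).nodup_iff.mpr hnodupA
    rw [List.perm_ext_iff_of_nodup hnodupL (by unfold pvStepB; exact PySem.List.nodup_dedup _)]
    intro x
    rw [PySem.List.mem_sorted, pvMem_foldl_update, pvMem_stepB]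
    simp only [PySem.Set.empty, List.not_mem_nil, false_or]
    constructor
    · rintro ⟨it, hit, hx⟩; exact ⟨it, ih.mem_iff.mp hit, hx⟩
    · rintro ⟨it, hit, hx⟩; exact ⟨it, ih.mem_iff.mpr hit, hx⟩

-- A's result is already weakly sorted
theorem pvGenA_pairwise (clr_lst : List String) :
    (gen_clr_seq clr_lst).Pairwise (fun a b : String => a ≤ b) := by
  cases clr_lst with
  | nil => simp [gen_clr_seq]
  | cons clr0 rest =>
    rw [pvGenA_cons]
    exact PySem.List.sorted_pairwise _ _

-- ===== VERDICT (by name: the statement is the Claim_ definition above) =====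
theorem gen_clr_seq_spec : Claim_equal_gen_clr_seq := by
  intro clr_lst _
  show gen_clr_seq clr_lst = gen_clr_seq_alt clr_lst
  have h1 : gen_clr_seq_alt clr_lst
      = PySem.List.sorted (pvAccB clr_lst) (fun x => x) false := rfl
  rw [h1,
    PySem.List.sorted_eq_sorted_of_perm _ _ _ (fun a b h => h) (pvPerm_main clr_lst).symm,
    PySem.List.sorted_eq_self_of_pairwise _ _ (pvGenA_pairwise clr_lst)]
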